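-- pv_equiv track=rewrite | github.com/TypeOracle/TypeOracleSrc | TypeInfer/adobe/3.generic_object/stage2/parse2.py | parseastr
-- ===== SOURCE A (Python) =====
-- def parseastr(st):
-- 	tmp = [int(st[i*2:i*2+2],16) for i in range(4)]
-- 	tmp.reverse()
-- 	nlst = []
-- 	for i in tmp:
-- 		if i!=0:
-- 			nlst.append(chr(i))
-- 		else:
-- 			break
-- 	return ''.join(nlst)
-- ===== SOURCE B (Python) =====
-- def parseastr(st):
--     # Pack the four parsed bytes into one 32-bit integer (big-endian Horner),
--     # then peel bytes off the low end with divmod -- the low byte comes first,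
--     # which is exactly the reversed order -- stopping at the first zero byte.
--     n = 0
--     for i in range(4):
--         n = n * 256 + int(st[i * 2:i * 2 + 2], 16)
--     out = []
--     for _ in range(4):
--         n, b = divmod(n, 256)
--         if b == 0:
--             break
--         out.append(chr(b))
--     return ''.join(out)
-- ===== Notes on version B (the rewrite author's own statement) =====
-- stated objective: alternative
-- what changed: B packs the four parsed bytes into a single integer by a Horner pass (n = n*256 + byte) and then peels bytes off its low end with divmod until a zero byte, so the reversed order falls out of byte significance; A builds a list of the four values, reverses it, and appends chr(i) in a break-at-zero loop.
import Mathlib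
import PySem

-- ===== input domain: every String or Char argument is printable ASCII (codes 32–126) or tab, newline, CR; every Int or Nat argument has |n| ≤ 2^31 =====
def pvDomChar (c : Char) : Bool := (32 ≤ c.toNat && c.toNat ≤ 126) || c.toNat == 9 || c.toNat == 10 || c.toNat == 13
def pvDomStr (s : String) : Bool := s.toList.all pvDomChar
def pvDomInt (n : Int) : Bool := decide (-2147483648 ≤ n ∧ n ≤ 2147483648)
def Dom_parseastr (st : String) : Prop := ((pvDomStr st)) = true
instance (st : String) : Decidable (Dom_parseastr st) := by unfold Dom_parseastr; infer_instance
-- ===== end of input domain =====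

-- B packs the four parsed bytes into one integer (Horner) and peels bytes off its low end with
-- divmod until a zero byte, instead of A's list build, reverse and append-and-break loop;
-- same return value on Pre_.

-- ===== PORT A =====
-- A's `for i in tmp: if i != 0: nlst.append(chr(i)) else: break` loop (chr is exact here:
-- under Pre_ every value it is applied to is a byte 0..255)
def pvLoopA : List Int → List Char
  | [] => []
  | i :: rest => if i ≠ 0 then Char.ofNat i.toNat :: pvLoopA rest else []

def parseastr (st : String) : String :=
  let cs := st.toList
  -- tmp = [int(st[i*2:i*2+2], 16) for i in range(4)]  (getD 0 is never reached under Pre_)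
  let tmp := (PySem.List.pyRange 0 4 1).map (fun i =>
    (PySem.Int.ofCharsBase? (PySem.List.slice cs (some (i*2)) (some (i*2+2))) 16).getD 0)
  let tmp2 := tmp.reverse
  String.ofList (pvLoopA tmp2)

-- ===== PORT B =====
-- `for _ in range(4): n, b = divmod(n, 256); if b == 0: break; out.append(chr(b))`
-- (divmod(n, 256) = (n // 256, n % 256) is floordiv/mod; chr exact: b is a byte under Pre_)
def pvLoopB : Nat → Int → List Char
  | 0, _ => []
  | Nat.succ k, n =>
    let n' := PySem.Int.floordiv n 256
    let b := PySem.Int.mod n 256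
    if b = 0 then [] else Char.ofNat b.toNat :: pvLoopB k n'

def parseastr_alt (st : String) : String :=
  -- n = 0; for i in range(4): n = n*256 + int(st[i*2:i*2+2], 16)
  let n := (PySem.List.pyRange 0 4 1).foldl (fun n i =>
    n * 256 + (PySem.Int.ofCharsBase? (PySem.List.slice st.toList (some (i*2)) (some (i*2+2))) 16).getD 0) 0
  String.ofList (pvLoopB 4 n)

-- ===== PRECONDITION & SPEC =====
-- int(st[i*2:i*2+2], 16), the value A's comprehension parses (none = ValueError)
def pvParsed (st : String) (i : Int) : Option Int :=
  PySem.Int.ofCharsBase? (PySem.List.slice st.toList (some (i*2)) (some (i*2+2))) 16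

-- scanning until the first zero, every value is nonnegative (a negative value, reachable
-- through a '-' sign in a pair, would make A's chr raise ValueError)
def pvOkRev : List Int → Bool
  | [] => true
  | v :: r => if v = 0 then true else decide (0 ≤ v) && pvOkRev r

-- Pre_ is exactly the inputs on which A returns: all four two-character slices parse under
-- int(·,16) to a value ≤ 255 (automatic for a two-character slice), and in reversed order no
-- negative value occurs before the first zero byte — otherwise A raises ValueError.
def Pre_parseastr (st : String) : Prop :=
  (∀ i ∈ PySem.List.pyRange 0 4 1, ((pvParsed st i).any (fun v => decide (v ≤ 255))) = true) ∧
  pvOkRev [(pvParsed st 3).getD 0, (pvParsed st 2).getD 0,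
           (pvParsed st 1).getD 0, (pvParsed st 0).getD 0] = true
instance (st : String) : Decidable (Pre_parseastr st) := by unfold Pre_parseastr; infer_instance

def pvWitness_parseastr : String := "4f6b2100"

def Spec_parseastr (st : String) (out : String) : Prop := out = parseastr_alt st
instance (st : String) (out : String) : Decidable (Spec_parseastr st out) := by unfold Spec_parseastr; infer_instance

-- ===== CLAIM (what is proved, stated in full; the proofs are below) =====
def Claim_equal_parseastr : Prop := ∀ (st : String), Dom_parseastr st → Pre_parseastr st → Spec_parseastr st (parseastr st)

-- ===== LEMMAS AND PROOFS =====

-- core: peeling bytes of p0·2^24 + p1·2^16 + p2·2^8 + p3 from the low end (B) visits exactly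
-- p3, p2, p1, p0 — A's reversed list — and stops at the same zero byte; bytes after the stop
-- never influence a lower mod/floordiv, so they need no bounds
theorem pv_core (p0 p1 p2 p3 n : Int)
    (hb0 : p0 ≤ 255) (hb1 : p1 ≤ 255) (hb2 : p2 ≤ 255) (hb3 : p3 ≤ 255)
    (hok : pvOkRev [p3, p2, p1, p0] = true)
    (hn : n = ((p0 * 256 + p1) * 256 + p2) * 256 + p3) :
    pvLoopB 4 n = pvLoopA [p3, p2, p1, p0] := by
  subst hn
  simp only [pvLoopB, pvLoopA]
  by_cases h3 : p3 = 0
  · have e3 : PySem.Int.mod (((p0 * 256 + p1) * 256 + p2) * 256 + p3) 256 = 0 := by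
      rw [PySem.Int.mod_eq_emod_of_pos (show (0:Int) < 256 by omega)]; omega
    rw [e3]; simp [h3]
  · simp only [pvOkRev, if_neg h3, Bool.and_eq_true, decide_eq_true_eq] at hok
    obtain ⟨hp3, hok⟩ := hok
    have e3 : PySem.Int.mod (((p0 * 256 + p1) * 256 + p2) * 256 + p3) 256 = p3 := by
      rw [PySem.Int.mod_eq_emod_of_pos (show (0:Int) < 256 by omega)]; omega
    have d3 : PySem.Int.floordiv (((p0 * 256 + p1) * 256 + p2) * 256 + p3) 256
        = (p0 * 256 + p1) * 256 + p2 := by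
      rw [PySem.Int.floordiv_eq_ediv_of_pos (show (0:Int) < 256 by omega)]; omega
    rw [e3, d3]
    by_cases h2 : p2 = 0
    · have e2 : PySem.Int.mod ((p0 * 256 + p1) * 256 + p2) 256 = 0 := by
        rw [PySem.Int.mod_eq_emod_of_pos (show (0:Int) < 256 by omega)]; omega
      rw [e2]; simp [h3, h2]
    · simp only [if_neg h2, Bool.and_eq_true, decide_eq_true_eq] at hok
      obtain ⟨hp2, hok⟩ := hok
      have e2 : PySem.Int.mod ((p0 * 256 + p1) * 256 + p2) 256 = p2 := by
        rw [PySem.Int.mod_eq_emod_of_pos (show (0:Int) < 256 by omega)]; omega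
      have d2 : PySem.Int.floordiv ((p0 * 256 + p1) * 256 + p2) 256 = p0 * 256 + p1 := by
        rw [PySem.Int.floordiv_eq_ediv_of_pos (show (0:Int) < 256 by omega)]; omega
      rw [e2, d2]
      by_cases h1 : p1 = 0
      · have e1 : PySem.Int.mod (p0 * 256 + p1) 256 = 0 := by
          rw [PySem.Int.mod_eq_emod_of_pos (show (0:Int) < 256 by omega)]; omega
        rw [e1]; simp [h3, h2, h1]
      · simp only [if_neg h1, Bool.and_eq_true, decide_eq_true_eq] at hok
        obtain ⟨hp1, hok⟩ := hok
        have e1 : PySem.Int.mod (p0 * 256 + p1) 256 = p1 := by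
          rw [PySem.Int.mod_eq_emod_of_pos (show (0:Int) < 256 by omega)]; omega
        have d1 : PySem.Int.floordiv (p0 * 256 + p1) 256 = p0 := by
          rw [PySem.Int.floordiv_eq_ediv_of_pos (show (0:Int) < 256 by omega)]; omega
        rw [e1, d1]
        by_cases h0 : p0 = 0
        · have e0 : PySem.Int.mod p0 256 = 0 := by
            rw [PySem.Int.mod_eq_emod_of_pos (show (0:Int) < 256 by omega)]; omega
          rw [e0]; simp [h3, h2, h1, h0]
        · simp only [if_neg h0, Bool.and_eq_true, decide_eq_true_eq] at hok
          obtain ⟨hp0, _⟩ := hok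
          have e0 : PySem.Int.mod p0 256 = p0 := by
            rw [PySem.Int.mod_eq_emod_of_pos (show (0:Int) < 256 by omega)]; omega
          rw [e0]; simp [h3, h2, h1, h0]

-- Option.any f o = true gives the value and the fact
theorem pv_any_elim (o : Option Int) (f : Int → Bool) (h : o.any f = true) :
    ∃ v, o = some v ∧ f v = true := by
  cases o with
  | none => simp at h
  | some v => exact ⟨v, rfl, by simpa using h⟩

-- ===== VERDICT (by name: the statement is the Claim_ definition above) =====
theorem parseastr_spec : Claim_equal_parseastr := by
  intro st _ hpre
  obtain ⟨hb, hok⟩ := hpre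
  obtain ⟨v0, e0, b0⟩ := pv_any_elim _ _ (hb 0 (by decide))
  obtain ⟨v1, e1, b1⟩ := pv_any_elim _ _ (hb 1 (by decide))
  obtain ⟨v2, e2, b2⟩ := pv_any_elim _ _ (hb 2 (by decide))
  obtain ⟨v3, e3, b3⟩ := pv_any_elim _ _ (hb 3 (by decide))
  simp only [decide_eq_true_eq] at b0 b1 b2 b3
  rw [e0, e1, e2, e3] at hok
  simp only [Option.getD_some] at hok
  simp only [pvParsed] at e0 e1 e2 e3
  norm_num at e0 e1 e2 e3
  unfold Spec_parseastr
  simp only [parseastr, parseastr_alt,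
    show PySem.List.pyRange 0 4 1 = [0, 1, 2, 3] from by decide, List.map,
    List.foldl_cons, List.foldl_nil,
    List.reverse_cons, List.reverse_nil, List.nil_append, List.cons_append]
  norm_num
  rw [e0, e1, e2, e3]
  simp only [Option.getD_some]
  rw [pv_core v0 v1 v2 v3 _ b0 b1 b2 b3 hok (by ring)]
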